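-- pv_equiv track=rewrite | github.com/b-zhu524/usaco_practice | alphabet/alphabet.py | solve
-- ===== SOURCE A (Python) =====
-- def solve(a, heard):
--     heard_idx = 0
--     alphabet_idx = 0
--     num_iters = 0
--     heard_len = len(heard)
--     alphabet_len = len(a)
--
--     while heard_idx < heard_len:
--         if alphabet_idx == alphabet_len:
--             alphabet_idx = 0
--
--         if alphabet_idx == 0:
--             num_iters += 1
--
--         if a[alphabet_idx] == heard[heard_idx]:
--             heard_idx += 1
--             alphabet_idx += 1
--         else:
--             alphabet_idx += 1
--
--     return num_iters
-- ===== SOURCE B (Python) =====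
-- def solve(a, heard):
--     if not heard:
--         return 0
--     # index the alphabet once: char -> sorted list of its positions
--     pos = {}
--     for i, c in enumerate(a):
--         pos.setdefault(c, []).append(i)
--     passes = 1
--     cur = 0
--     for c in heard:
--         ps = pos[c]
--         # binary search: first position >= cur
--         lo, hi = 0, len(ps)
--         while lo < hi:
--             mid = (lo + hi) // 2
--             if ps[mid] < cur:
--                 lo = mid + 1
--             else:
--                 hi = mid
--         if lo == len(ps):   # no occurrence left in this pass: wrap around
--             passes += 1
--             cur = ps[0] + 1
--         else:
--             cur = ps[lo] + 1
--     return passes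
-- ===== Notes on version B (the rewrite author's own statement) =====
-- stated objective: alternative
-- what changed: B replaces A's letter-by-letter walk through the cyclic alphabet with a char->sorted-positions index built once plus a binary search for the next matching position, counting a new pass whenever no position remains past the cursor.
import Mathlib
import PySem

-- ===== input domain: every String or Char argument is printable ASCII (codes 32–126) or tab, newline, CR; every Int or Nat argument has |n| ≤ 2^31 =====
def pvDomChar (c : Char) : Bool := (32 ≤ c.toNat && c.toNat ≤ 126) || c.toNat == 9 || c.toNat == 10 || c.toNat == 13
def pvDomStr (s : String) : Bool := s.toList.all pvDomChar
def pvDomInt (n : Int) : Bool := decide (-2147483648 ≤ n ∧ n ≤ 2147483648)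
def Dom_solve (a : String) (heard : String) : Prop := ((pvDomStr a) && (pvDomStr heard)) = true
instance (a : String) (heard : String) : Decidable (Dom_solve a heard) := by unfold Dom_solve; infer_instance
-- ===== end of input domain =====

-- B indexes the alphabet once (char -> list of positions) and binary-searches the next
-- match instead of A's letter-by-letter walk through the cyclic alphabet (objective: alternative algorithm).

-- ===== PORT A =====
-- A's while loop, one iteration per fuel unit; the fuel chosen in `solve` is enough for
-- every input satisfying Pre_solve (proved below); outside Pre_ the Python loops forever
-- or raises IndexError, so nothing is claimed there.  a[idx] is always in range inside
-- Pre_ (idx is reset before use), so getD transcribes it exactly there.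
def loopA (al hl : List Char) : Nat → Nat → Nat → Int → Int
  | 0, _, _, n => n
  | fuel+1, hi, ai, n =>
    if hi < hl.length then
      let ai' := if ai = al.length then 0 else ai
      let n' := if ai' = 0 then n + 1 else n
      if al.getD ai' ' ' = hl.getD hi ' ' then
        loopA al hl fuel (hi+1) (ai'+1) n'
      else
        loopA al hl fuel hi (ai'+1) n'
    else n

def solve (a : String) (heard : String) : Int :=
  let al := a.toList
  let hl := heard.toList
  loopA al hl (hl.length * al.length + al.length + 1) 0 0 0

-- ===== PORT B =====
-- Source B's hand-written binary search: first index k in [lo, hi) with ps[k] ≥ cur.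
-- Indices stay in range inside Pre_, so getD transcribes ps[mid] exactly there.
def bsearch (ps : List Int) (cur : Int) (lo hi : Nat) : Nat :=
  if lo < hi then
    let mid := (lo + hi) / 2
    if ps.getD mid 0 < cur then bsearch ps cur (mid + 1) hi
    else bsearch ps cur lo mid
  else lo
termination_by hi - lo
decreasing_by all_goals omega

-- Source B: pos.setdefault(c, []).append(i) over enumerate(a); pos[c] is looked up only for
-- characters of heard, which Pre_ guarantees occur in a, so getD transcribes it exactly there.
def solve_alt (a : String) (heard : String) : Int :=
  let al := a.toList
  let hl := heard.toList
  if hl = [] then 0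
  else
    let pos : PySem.Dict Char (List Int) :=
      (PySem.List.enumerate al 0).foldl (fun d p => d.modify p.2 [] (· ++ [p.1])) PySem.Dict.empty
    (hl.foldl (fun (s : Int × Int) c =>
        let ps := pos.getD c []
        let k := bsearch ps s.2 0 ps.length
        if k = ps.length then (s.1 + 1, ps.getD 0 0 + 1)
        else (s.1, ps.getD k 0 + 1)) ((1 : Int), (0 : Int))).1

-- ===== PRECONDITION & SPEC =====
-- Pre_ excludes exactly the inputs on which the Python A never returns: a character of
-- heard missing from a makes the while loop spin forever (and a = "" with heard ≠ ""
-- raises IndexError).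
def Pre_solve (a : String) (heard : String) : Prop :=
  (heard.toList.all (fun c => a.toList.contains c)) = true
instance (a : String) (heard : String) : Decidable (Pre_solve a heard) := by
  unfold Pre_solve; infer_instance

def pvWitness_solve : String × String := ("abc", "cab")

def Spec_solve (a : String) (heard : String) (out : Int) : Prop := out = solve_alt a heard
instance (a : String) (heard : String) (out : Int) : Decidable (Spec_solve a heard out) := by unfold Spec_solve; infer_instance

-- ===== CLAIM (what is proved, stated in full; the proofs are below) =====
def Claim_equal_solve : Prop := ∀ (a : String) (heard : String), Dom_solve a heard → Pre_solve a heard → Spec_solve a heard (solve a heard)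

-- ===== LEMMAS AND PROOFS =====

lemma singleton_prefix_drop (al : List Char) (c : Char) (j : Nat) :
    [c] <+: al.drop j ↔ (j < al.length ∧ al.getD j ' ' = c) := by
  have h1 : [c] <+: al.drop j ↔ (al.drop j).head? = some c := by
    constructor
    · rintro ⟨t, ht⟩; rw [← ht]; rfl
    · intro h; cases hd : al.drop j with
      | nil => rw [hd] at h; simp at h
      | cons x t => rw [hd] at h; simp at h; exact ⟨t, by simp [h]⟩
  rw [h1, List.head?_drop]
  constructor
  · intro h
    have hj : j < al.length := by
      by_contra hcon
      rw [List.getElem?_eq_none (by omega)] at h; simp at h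
    refine ⟨hj, ?_⟩
    rw [List.getD_eq_getElem?_getD, List.getElem?_eq_getElem hj] at *
    simp at h ⊢; exact h
  · rintro ⟨hj, h⟩
    rw [List.getElem?_eq_getElem hj]
    rw [List.getD_eq_getElem?_getD, List.getElem?_eq_getElem hj] at h
    simp at h ⊢; exact h

def firstFrom (al : List Char) (c : Char) (k : Nat) : Option Nat :=
  let r := PySem.Chars.find (al.drop k) [c]
  if r = -1 then none else some (k + r.toNat)

lemma firstFrom_some (al : List Char) (c : Char) (k j : Nat)
    (h : firstFrom al c k = some j) :
    k ≤ j ∧ j < al.length ∧ al.getD j ' ' = c ∧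
      (∀ t, k ≤ t → t < j → al.getD t ' ' ≠ c) := by
  unfold firstFrom at h
  set r := PySem.Chars.find (al.drop k) [c] with hr
  by_cases h1 : r = -1
  · simp [h1] at h
  · simp [h1] at h
    have hge : 0 ≤ r := by
      have := PySem.Chars.neg_one_le_find (al.drop k) [c]
      rw [← hr] at this; omega
    have hspec := PySem.Chars.find_spec (s := al.drop k) (sub := [c]) (by rw [← hr]; exact hge)
    rw [← hr] at hspec
    obtain ⟨hpre, hmin⟩ := hspec
    rw [List.drop_drop] at hpre
    rw [singleton_prefix_drop] at hpre
    refine ⟨by omega, by rw [← h]; omega, ?_, ?_⟩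
    · rw [← h]; exact hpre.2
    · intro t hkt htj hc
      have hi : t - k < r.toNat := by omega
      have := hmin (t - k) hi
      rw [List.drop_drop] at this
      rw [singleton_prefix_drop] at this
      rw [show k + (t - k) = t from by omega] at this
      exact this ⟨by omega, hc⟩

lemma firstFrom_none (al : List Char) (c : Char) (k : Nat)
    (h : firstFrom al c k = none) :
    ∀ t, k ≤ t → t < al.length → al.getD t ' ' ≠ c := by
  unfold firstFrom at h
  by_cases h1 : PySem.Chars.find (al.drop k) [c] = -1
  · rw [PySem.Chars.find_eq_neg_one_iff] at h1
    intro t hkt htl hc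
    apply h1
    have hp : [c] <+: al.drop t := (singleton_prefix_drop al c t).2 ⟨htl, hc⟩
    have hs : al.drop t <:+ al.drop k := by
      have h2 := List.drop_suffix (t - k) (al.drop k)
      rw [List.drop_drop] at h2
      rwa [show k + (t - k) = t from by omega] at h2
    exact hp.isInfix.trans hs.isInfix
  · simp [h1] at h

lemma firstFrom_eq_some_of (al : List Char) (c : Char) (k j : Nat)
    (hkj : k ≤ j) (hjl : j < al.length) (hget : al.getD j ' ' = c)
    (hmin : ∀ t, k ≤ t → t < j → al.getD t ' ' ≠ c) :
    firstFrom al c k = some j := by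
  cases h : firstFrom al c k with
  | none => exact absurd hget (firstFrom_none al c k h j hkj hjl)
  | some j' =>
    obtain ⟨h1, h2, h3, h4⟩ := firstFrom_some al c k j' h
    congr 1
    by_contra hne
    rcases Nat.lt_or_ge j' j with hlt | hge
    · exact hmin j' h1 hlt h3
    · exact h4 j hkj (by omega) hget

lemma firstFrom_zero_of_mem (al : List Char) (c : Char) (hc : c ∈ al) :
    ∃ j, firstFrom al c 0 = some j := by
  cases h : firstFrom al c 0 with
  | some j => exact ⟨j, rfl⟩
  | none =>
    exfalso
    obtain ⟨i, hi, hget⟩ := List.getElem_of_mem hc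
    exact firstFrom_none al c 0 h i (Nat.zero_le _) hi (by simp [List.getD_eq_getElem?_getD, List.getElem?_eq_getElem hi, hget])

lemma drop_cons_facts (hl : List Char) (hi : Nat) (c : Char) (cs : List Char)
    (h : hl.drop hi = c :: cs) :
    hi < hl.length ∧ hl.getD hi ' ' = c ∧ hl.drop (hi+1) = cs := by
  have hlen : hi < hl.length := by
    by_contra hcon
    rw [List.drop_eq_nil_of_le (by omega)] at h; simp at h
  have hh : hl[hi]? = some c := by
    rw [← List.head?_drop, h]; rfl
  refine ⟨hlen, ?_, ?_⟩
  · rw [List.getD_eq_getElem?_getD, hh]; rfl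
  · rw [← List.tail_drop, h]; rfl

lemma scanA (al hl : List Char) (hi : Nat) (c : Char) (cs : List Char)
    (hhi : hl.drop hi = c :: cs) :
    ∀ d ai, 1 ≤ ai → ai + d ≤ al.length →
      (∀ t, ai ≤ t → t < ai + d → al.getD t ' ' ≠ c) →
      ∀ fuel (n : Int), loopA al hl (fuel + d) hi ai n = loopA al hl fuel hi (ai + d) n := by
  intro d
  induction d with
  | zero => intro ai _ _ _ fuel n; rfl
  | succ d ih =>
    intro ai h1 h2 h3 fuel n
    obtain ⟨hhl, hget, -⟩ := drop_cons_facts hl hi c cs hhi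
    have hne_len : ai ≠ al.length := by omega
    have hne0 : ai ≠ 0 := by omega
    rw [show fuel + (d+1) = (fuel + d) + 1 from by omega, loopA]
    simp only [if_pos hhl, if_neg hne_len, if_neg hne0, hget,
      if_neg (h3 ai (le_refl ai) (by omega))]
    rw [ih (ai+1) (by omega) (by omega)
      (fun t ht1 ht2 => h3 t (by omega) (by omega)) fuel n]
    rw [show ai + 1 + d = ai + (d+1) from by omega]

def G (al : List Char) : List Char → Nat → Int
  | [], _ => 0
  | c :: cs, k =>
    match firstFrom al c k with
    | some j => G al cs (j+1)
    | none =>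
      match firstFrom al c 0 with
      | some j => 1 + G al cs (j+1)
      | none => 0

lemma loopA_done (al hl : List Char) (fuel hi ai : Nat) (n : Int)
    (h : hl.length ≤ hi) : loopA al hl fuel hi ai n = n := by
  cases fuel with
  | zero => rfl
  | succ f => simp [loopA, Nat.not_lt.mpr h]

-- one matching step, 1 ≤ ai < al.length, al[ai] = current heard char
lemma stepMatch (al hl : List Char) (hi ai : Nat) (c : Char) (cs : List Char) (n : Int) (fuel : Nat)
    (hhi : hl.drop hi = c :: cs) (h1 : 1 ≤ ai) (h2 : ai < al.length)
    (hc : al.getD ai ' ' = c) :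
    loopA al hl (fuel + 1) hi ai n = loopA al hl fuel (hi+1) (ai+1) n := by
  obtain ⟨hhl, hget, -⟩ := drop_cons_facts hl hi c cs hhi
  rw [loopA, if_pos hhl]
  simp only [if_neg (show ai ≠ al.length from by omega),
    if_neg (show ai ≠ 0 from by omega)]
  rw [hget, hc, if_pos rfl]

lemma mainA (al hl : List Char) :
    ∀ (cs : List Char) (hi ai : Nat) (n : Int) (fuel : Nat),
      hl.drop hi = cs → 1 ≤ ai → ai ≤ al.length →
      (∀ c ∈ cs, c ∈ al) →
      (al.length - ai) + cs.length * al.length < fuel →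
      loopA al hl fuel hi ai n = n + G al cs ai := by
  intro cs
  induction cs with
  | nil =>
    intro hi ai n fuel hdrop _ _ _ _
    rw [List.drop_eq_nil_iff] at hdrop
    rw [loopA_done al hl fuel hi ai n hdrop]; simp [G]
  | cons c cs ih =>
    intro hi ai n fuel hdrop h1 h2 hmem hfuel
    obtain ⟨hhl, hget, hdrop'⟩ := drop_cons_facts hl hi c cs hdrop
    have hmem' : ∀ x ∈ cs, x ∈ al := fun x hx => hmem x (List.mem_cons_of_mem _ hx)
    have hcal : c ∈ al := hmem c (List.mem_cons_self)
    obtain ⟨j0, hj0⟩ := firstFrom_zero_of_mem al c hcal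
    have hmul : (c :: cs).length * al.length = cs.length * al.length + al.length := by
      simp [List.length_cons]; ring
    obtain ⟨-, hj0lt, hj0get, hj0min⟩ := firstFrom_some al c 0 j0 hj0
    cases hff : firstFrom al c ai with
    | some j =>
      obtain ⟨hkj, hjlt, hjget, hjmin⟩ := firstFrom_some al c ai j hff
      obtain ⟨fuel', rfl⟩ : ∃ f', fuel = (f' + 1) + (j - ai) :=
        ⟨fuel - (j - ai) - 1, by omega⟩
      rw [scanA al hl hi c cs hdrop (j - ai) ai h1 (by omega)
        (fun t ht1 ht2 => hjmin t ht1 (by omega)) (fuel' + 1) n]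
      rw [show ai + (j - ai) = j from by omega]
      rw [stepMatch al hl hi j c cs n fuel' hdrop (by omega) hjlt hjget]
      rw [ih (hi+1) (j+1) n fuel' hdrop' (by omega) (by omega) hmem' (by omega)]
      simp [G, hff]
    | none =>
      have hnomatch := firstFrom_none al c ai hff
      -- scan to the end of the alphabet
      obtain ⟨fuel', rfl⟩ : ∃ f', fuel = (f' + 1) + (al.length - ai) :=
        ⟨fuel - (al.length - ai) - 1, by omega⟩
      rw [scanA al hl hi c cs hdrop (al.length - ai) ai h1 (by omega)
        (fun t ht1 ht2 => hnomatch t ht1 (by omega)) (fuel' + 1) n]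
      rw [show ai + (al.length - ai) = al.length from by omega]
      -- wrap step: reset to 0, count a pass, compare al[0]
      rcases Nat.eq_zero_or_pos j0 with hj00 | hj0pos
      · -- al[0] = c : match immediately after the reset
        subst hj00
        have hstep : loopA al hl (fuel' + 1) hi al.length n
            = loopA al hl fuel' (hi+1) 1 (n+1) := by
          rw [loopA, if_pos hhl]
          simp only [if_true]
          rw [hget, hj0get, if_pos rfl]
        rw [hstep]
        rw [ih (hi+1) 1 (n+1) fuel' hdrop' (by omega) (by omega) hmem' (by omega)]
        simp [G, hff, hj0]
        ring
      · -- al[0] ≠ c : wrap, then scan 1..j0-1, then match at j0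
        have hstep : loopA al hl (fuel' + 1) hi al.length n
            = loopA al hl fuel' hi 1 (n+1) := by
          rw [loopA, if_pos hhl]
          simp only [if_true]
          rw [hget, if_neg (hj0min 0 (by omega) (by omega))]
        obtain ⟨fuel'', rfl⟩ : ∃ f'', fuel' = (f'' + 1) + (j0 - 1) :=
          ⟨fuel' - (j0 - 1) - 1, by omega⟩
        rw [hstep]
        rw [scanA al hl hi c cs hdrop (j0 - 1) 1 (by omega) (by omega)
          (fun t ht1 ht2 => hj0min t (by omega) (by omega)) (fuel'' + 1) (n+1)]
        rw [show 1 + (j0 - 1) = j0 from by omega]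
        rw [stepMatch al hl hi j0 c cs (n+1) fuel'' hdrop (by omega) hj0lt hj0get]
        rw [ih (hi+1) (j0+1) (n+1) fuel'' hdrop' (by omega) (by omega) hmem' (by omega)]
        simp [G, hff, hj0]
        ring

lemma topA (al hl : List Char) (h : hl ≠ [])
    (hmem : ∀ c ∈ hl, c ∈ al) :
    loopA al hl (hl.length * al.length + al.length + 1) 0 0 0 = 1 + G al hl 0 := by
  cases hl with
  | nil => exact absurd rfl h
  | cons c cs =>
    have hcal : c ∈ al := hmem c (List.mem_cons_self)
    have halen : 1 ≤ al.length := List.length_pos_of_mem hcal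
    have hmul : (c :: cs).length * al.length = cs.length * al.length + al.length := by
      simp [List.length_cons]; ring
    have hdrop0 : (c :: cs).drop 0 = c :: cs := rfl
    have hdrop1 : (c :: cs).drop 1 = cs := rfl
    have hmem' : ∀ x ∈ cs, x ∈ al := fun x hx => hmem x (List.mem_cons_of_mem _ hx)
    obtain ⟨j0, hj0⟩ := firstFrom_zero_of_mem al c hcal
    obtain ⟨-, hj0lt, hj0get, hj0min⟩ := firstFrom_some al c 0 j0 hj0
    have hgc : (c :: cs).getD 0 ' ' = c := rfl
    -- first iteration: index 0, count the first pass
    rw [loopA, if_pos (by simp)]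
    simp only [if_neg (show (0:Nat) ≠ al.length from by omega), if_true]
    rw [hgc]
    rcases Nat.eq_zero_or_pos j0 with hj00 | hj0pos
    · subst hj00
      rw [hj0get, if_pos rfl]
      rw [mainA al (c :: cs) cs 1 1 (0+1) _ hdrop1 (by omega) (by omega) hmem' (by omega)]
      simp [G, hj0]
    · rw [if_neg (by rw [show al.getD 0 ' ' = al.getD 0 ' ' from rfl]; exact hj0min 0 (by omega) (by omega))]
      obtain ⟨F', hF⟩ : ∃ f', (c :: cs).length * al.length + al.length = ((f' + 1) + (j0 - 1)) :=
        ⟨(c :: cs).length * al.length + al.length - (j0 - 1) - 1, by omega⟩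
      rw [hF]
      rw [scanA al (c :: cs) 0 c cs hdrop0 (j0 - 1) 1 (by omega) (by omega)
        (fun t ht1 ht2 => hj0min t (by omega) (by omega)) (F' + 1) (0+1)]
      rw [show 1 + (j0 - 1) = j0 from by omega]
      rw [stepMatch al (c :: cs) 0 j0 c cs (0+1) F' hdrop0 (by omega) hj0lt hj0get]
      rw [mainA al (c :: cs) cs 1 (j0+1) (0+1) F' hdrop1 (by omega) (by omega) hmem' (by omega)]
      simp [G, hj0]

-- ---------- B side ----------

-- the positions list of character c in al, as the dict build produces it
def posL (al : List Char) (c : Char) : List Int :=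
  ((PySem.List.enumerate al 0).filter (fun p => p.2 == c)).map (·.1)

lemma pos_getD (al : List Char) (c : Char) :
    ((PySem.List.enumerate al 0).foldl (fun d p => d.modify p.2 [] (· ++ [p.1]))
        (PySem.Dict.empty : PySem.Dict Char (List Int))).getD c [] = posL al c := by
  have h : (PySem.List.enumerate al 0).foldl (fun d p => d.modify p.2 [] (· ++ [p.1]))
        (PySem.Dict.empty : PySem.Dict Char (List Int))
      = ((PySem.List.enumerate al 0).map (fun p => (p.2, p.1))).foldl
          (fun d p => d.modify p.1 [] (· ++ [p.2])) PySem.Dict.empty := by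
    rw [List.foldl_map]
  rw [h, PySem.Dict.getD_foldl_modify_append, PySem.Dict.getD_empty]
  unfold posL
  rw [List.filter_map, List.map_map]
  simp [Function.comp_def]

lemma mem_posL (al : List Char) (c : Char) (x : Int) :
    x ∈ posL al c ↔ ∃ k : Nat, k < al.length ∧ x = (k : Int) ∧ al.getD k ' ' = c := by
  unfold posL
  simp only [List.mem_map, List.mem_filter, PySem.List.mem_enumerate_iff]
  constructor
  · rintro ⟨p, ⟨⟨k, hk, rfl⟩, hc⟩, rfl⟩
    refine ⟨k, hk, by simp, ?_⟩
    simp at hc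
    rw [List.getD_eq_getElem?_getD, List.getElem?_eq_getElem hk]
    simpa using hc
  · rintro ⟨k, hk, rfl, hc⟩
    refine ⟨((k : Int), al[k]), ⟨⟨k, hk, by simp⟩, ?_⟩, rfl⟩
    rw [List.getD_eq_getElem?_getD, List.getElem?_eq_getElem hk] at hc
    simpa using hc

lemma pairwise_posL (al : List Char) (c : Char) :
    (posL al c).Pairwise (· < ·) := by
  unfold posL
  apply List.Pairwise.map
  · exact fun a b h => h
  · exact (PySem.List.pairwise_lt_enumerate al 0).filter _

-- getD-monotonicity of a strictly increasing list
lemma mono_getD (ps : List Int) (hp : ps.Pairwise (· < ·)) (i j : Nat)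
    (hij : i ≤ j) (hj : j < ps.length) :
    ps.getD i 0 ≤ ps.getD j 0 := by
  rcases Nat.eq_or_lt_of_le hij with rfl | hlt
  · exact le_refl _
  · have := (List.pairwise_iff_getElem.mp hp) i j (by omega) hj hlt
    rw [List.getD_eq_getElem?_getD, List.getD_eq_getElem?_getD,
      List.getElem?_eq_getElem (by omega : i < ps.length), List.getElem?_eq_getElem hj]
    exact le_of_lt (by simpa using this)

lemma bsearch_spec (ps : List Int) (cur : Int) (hp : ps.Pairwise (· < ·)) :
    ∀ n lo hi, hi - lo ≤ n → lo ≤ hi → hi ≤ ps.length →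
      lo ≤ bsearch ps cur lo hi ∧ bsearch ps cur lo hi ≤ hi ∧
      (∀ t, lo ≤ t → t < bsearch ps cur lo hi → ps.getD t 0 < cur) ∧
      (∀ t, bsearch ps cur lo hi ≤ t → t < hi → cur ≤ ps.getD t 0) := by
  intro n
  induction n with
  | zero =>
    intro lo hi h1 h2 h3
    have : lo = hi := by omega
    subst this
    rw [bsearch]
    simp only [lt_irrefl, if_false]
    exact ⟨le_refl _, le_refl _, fun t ht1 ht2 => by omega, fun t ht1 ht2 => by omega⟩
  | succ n ih =>
    intro lo hi h1 h2 h3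
    rw [bsearch]
    by_cases hlh : lo < hi
    · rw [if_pos hlh]
      by_cases hcmp : ps.getD ((lo + hi) / 2) 0 < cur
      · rw [if_pos hcmp]
        obtain ⟨k1, k2, k3, k4⟩ := ih ((lo + hi) / 2 + 1) hi (by omega) (by omega) h3
        refine ⟨by omega, k2, ?_, k4⟩
        intro t ht1 ht2
        by_cases htm : t ≤ (lo + hi) / 2
        · calc ps.getD t 0 ≤ ps.getD ((lo + hi) / 2) 0 :=
                mono_getD ps hp t ((lo + hi) / 2) htm (by omega)
            _ < cur := hcmp
        · exact k3 t (by omega) ht2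
      · rw [if_neg hcmp]
        obtain ⟨k1, k2, k3, k4⟩ := ih lo ((lo + hi) / 2) (by omega) (by omega) (by omega)
        refine ⟨k1, by omega, k3, ?_⟩
        intro t ht1 ht2
        by_cases htm : (lo + hi) / 2 ≤ t
        · calc cur ≤ ps.getD ((lo + hi) / 2) 0 := by omega
            _ ≤ ps.getD t 0 := mono_getD ps hp ((lo + hi) / 2) t htm (by omega)
        · exact k4 t ht1 (by omega)
    · rw [if_neg hlh]
      exact ⟨le_refl _, by omega, fun t ht1 ht2 => by omega, fun t ht1 ht2 => by omega⟩

lemma posL_ne_nil (al : List Char) (c : Char) (hc : c ∈ al) : posL al c ≠ [] := by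
  obtain ⟨i, hi, hget⟩ := List.getElem_of_mem hc
  intro hnil
  have : (i : Int) ∈ posL al c := (mem_posL al c i).2
    ⟨i, hi, rfl, by rw [List.getD_eq_getElem?_getD, List.getElem?_eq_getElem hi]; simpa using hget⟩
  rw [hnil] at this; simp at this

lemma posL_getD_mem (al : List Char) (c : Char) (t : Nat) (ht : t < (posL al c).length) :
    (posL al c).getD t 0 ∈ posL al c := by
  rw [List.getD_eq_getElem?_getD, List.getElem?_eq_getElem ht]
  exact List.getElem_mem ht

-- the binary-search step finds exactly firstFrom (or wraps to the first occurrence)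
lemma stepB (al : List Char) (c : Char) (hc : c ∈ al) (k : Nat) :
    (bsearch (posL al c) (k : Int) 0 (posL al c).length = (posL al c).length →
      firstFrom al c k = none ∧
      firstFrom al c 0 = some ((posL al c).getD 0 0).toNat) ∧
    (bsearch (posL al c) (k : Int) 0 (posL al c).length < (posL al c).length →
      firstFrom al c k =
        some ((posL al c).getD (bsearch (posL al c) (k : Int) 0 (posL al c).length) 0).toNat) := by
  set ps := posL al c with hps
  set K := bsearch ps (k : Int) 0 ps.length with hK
  have hp := pairwise_posL al c
  obtain ⟨b1, b2, b3, b4⟩ := bsearch_spec ps (k : Int) hp ps.length 0 ps.length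
    (by omega) (by omega) (le_refl _)
  rw [← hK] at b1 b2 b3 b4
  -- every getD element of ps is an index of c
  have hmemD : ∀ t, t < ps.length → ∃ m : Nat, m < al.length ∧ ps.getD t 0 = (m : Int) ∧ al.getD m ' ' = c := by
    intro t ht
    have := (mem_posL al c _).1 (by rw [hps] at *; exact posL_getD_mem al c t ht)
    obtain ⟨m, hm1, hm2, hm3⟩ := this
    exact ⟨m, hm1, hm2, hm3⟩
  -- every index of c appears in ps at some position
  have hidx : ∀ m : Nat, m < al.length → al.getD m ' ' = c →
      ∃ t, t < ps.length ∧ ps.getD t 0 = (m : Int) := by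
    intro m hm1 hm2
    have : (m : Int) ∈ ps := by rw [hps]; exact (mem_posL al c _).2 ⟨m, hm1, rfl, hm2⟩
    obtain ⟨t, ht, hget⟩ := List.getElem_of_mem this
    exact ⟨t, ht, by rw [List.getD_eq_getElem?_getD, List.getElem?_eq_getElem ht]; simpa using hget⟩
  constructor
  · intro hEq
    constructor
    · cases hff : firstFrom al c k with
      | none => rfl
      | some j =>
        exfalso
        obtain ⟨h1, h2, h3, -⟩ := firstFrom_some al c k j hff
        obtain ⟨t, ht, hget⟩ := hidx j h2 h3
        have := b3 t (by omega) (by omega)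
        omega
    · -- ps[0] is the first occurrence of c
      have hne : ps ≠ [] := by rw [hps]; exact posL_ne_nil al c hc
      have h0 : 0 < ps.length := List.length_pos_iff.mpr hne
      obtain ⟨m, hm1, hm2, hm3⟩ := hmemD 0 h0
      rw [hm2]
      simp only [Int.toNat_natCast]
      apply firstFrom_eq_some_of al c 0 m (Nat.zero_le _) hm1 hm3
      intro t _ htm hct
      obtain ⟨u, hu, hugt⟩ := hidx t (by omega) hct
      have := mono_getD ps hp 0 u (Nat.zero_le _) hu
      omega
  · intro hLt
    obtain ⟨m, hm1, hm2, hm3⟩ := hmemD K hLt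
    rw [hm2]
    simp only [Int.toNat_natCast]
    have hkm : k ≤ m := by
      have := b4 K (le_refl _) hLt
      omega
    apply firstFrom_eq_some_of al c k m hkm hm1 hm3
    intro t hkt htm hct
    obtain ⟨u, hu, hugt⟩ := hidx t (by omega) hct
    by_cases huK : u < K
    · have := b3 u (Nat.zero_le _) huK
      omega
    · have := mono_getD ps hp K u (by omega) hu
      omega

lemma mainB (al : List Char) (pos : PySem.Dict Char (List Int))
    (hpos : pos = (PySem.List.enumerate al 0).foldl
        (fun d p => d.modify p.2 [] (· ++ [p.1])) PySem.Dict.empty) :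
    ∀ (cs : List Char) (p : Int) (k : Nat), k ≤ al.length →
      (∀ c ∈ cs, c ∈ al) →
      (cs.foldl (fun (s : Int × Int) c =>
          let ps := pos.getD c []
          let K := bsearch ps s.2 0 ps.length
          if K = ps.length then (s.1 + 1, ps.getD 0 0 + 1)
          else (s.1, ps.getD K 0 + 1)) (p, (k : Int))).1 = p + G al cs k := by
  intro cs
  induction cs with
  | nil => intro p k hk hm; simp [G]
  | cons c cs ih =>
    intro p k hk hm
    have hcal : c ∈ al := hm c List.mem_cons_self
    have hmem' : ∀ x ∈ cs, x ∈ al := fun x hx => hm x (List.mem_cons_of_mem _ hx)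
    rw [List.foldl_cons]
    have hgd : pos.getD c [] = posL al c := by rw [hpos]; exact pos_getD al c
    obtain ⟨hwrap, hfound⟩ := stepB al c hcal k
    set ps := posL al c with hps
    set K := bsearch ps (k : Int) 0 ps.length with hK
    obtain ⟨-, b2, -, -⟩ := bsearch_spec ps (k : Int) (pairwise_posL al c) ps.length 0 ps.length
      (by omega) (by omega) (le_refl _)
    rw [← hK] at b2
    by_cases hcase : K = ps.length
    · obtain ⟨hffk, hff0⟩ := hwrap hcase
      obtain ⟨-, hj0lt, -, -⟩ := firstFrom_some al c 0 _ hff0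
      have hnn : 0 ≤ ps.getD 0 0 := by
        have hne : ps ≠ [] := by rw [hps]; exact posL_ne_nil al c hcal
        have h0 : 0 < ps.length := List.length_pos_iff.mpr hne
        have := (mem_posL al c _).1 (posL_getD_mem al c 0 h0)
        obtain ⟨m, -, hm2, -⟩ := this
        rw [hps]
        omega
      have hstep : (let psv := pos.getD c []
          let Kv := bsearch psv (k : Int) 0 psv.length
          if Kv = psv.length then (p + 1, psv.getD 0 0 + 1)
          else (p, psv.getD Kv 0 + 1)) = (p + 1, (((ps.getD 0 0).toNat + 1 : Nat) : Int)) := by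
        simp only [hgd, ← hK, if_pos hcase]
        rw [show ((((ps.getD 0 0).toNat + 1 : Nat)) : Int) = ps.getD 0 0 + 1 from by
          push_cast [Int.toNat_of_nonneg hnn]; ring]
      rw [hstep, ih (p+1) ((ps.getD 0 0).toNat + 1) (by omega) hmem']
      simp [G, hffk, hff0]
      ring
    · have hLt : K < ps.length := by omega
      have hff := hfound hLt
      obtain ⟨-, hjlt, -, -⟩ := firstFrom_some al c k _ hff
      have hnn : 0 ≤ ps.getD K 0 := by
        have := (mem_posL al c _).1 (posL_getD_mem al c K (by rw [← hps] at *; exact hLt))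
        obtain ⟨m, -, hm2, -⟩ := this
        rw [hps]
        omega
      have hstep : (let psv := pos.getD c []
          let Kv := bsearch psv (k : Int) 0 psv.length
          if Kv = psv.length then (p + 1, psv.getD 0 0 + 1)
          else (p, psv.getD Kv 0 + 1)) = (p, (((ps.getD K 0).toNat + 1 : Nat) : Int)) := by
        simp only [hgd, ← hK, if_neg hcase]
        rw [show ((((ps.getD K 0).toNat + 1 : Nat)) : Int) = ps.getD K 0 + 1 from by
          push_cast [Int.toNat_of_nonneg hnn]; ring]
      rw [hstep, ih p ((ps.getD K 0).toNat + 1) (by omega) hmem']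
      simp [G, hff]

-- ===== VERDICT (by name: the statement is the Claim_ definition above) =====
theorem solve_spec : Claim_equal_solve := by
  intro a heard _ hpre
  unfold Spec_solve solve solve_alt
  by_cases hnil : heard.toList = []
  · simp [hnil, loopA_done]
  · have hmem : ∀ x ∈ heard.toList, x ∈ a.toList := by
      intro x hx
      have := List.all_eq_true.mp hpre x hx
      simpa using this
    have hB := mainB a.toList _ rfl heard.toList 1 0 (Nat.zero_le _) hmem
    simp only [Nat.cast_zero] at hB
    simp only [hnil, topA a.toList heard.toList hnil hmem, hB]
    simp
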